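-- pv_equiv track=rewrite | github.com/Jagrit3500/autoscaling-openenv | tasks.py | _spike_pattern
-- ===== SOURCE A (Python) =====
-- from typing import List
--
-- def _spike_pattern(
--     steps: int,
--     base: int,
--     spike: int,
--     spike_start: int,
--     spike_end: int
-- ) -> List[int]:
--     """
--     Single clean spike: traffic stays at base,
--     jumps to spike between spike_start and spike_end,
--     then returns to base.
--
--     Used for Task 1 (Easy).
--     """
--     pattern = []
--     for t in range(steps):
--         if spike_start <= t < spike_end:
--             pattern.append(spike)
--         else:
--             pattern.append(base)
--     return pattern
-- ===== SOURCE B (Python) =====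
-- from typing import List
--
-- def _spike_pattern(
--     steps: int,
--     base: int,
--     spike: int,
--     spike_start: int,
--     spike_end: int
-- ) -> List[int]:
--     # Assemble the result as three independent segments, each a single
--     # replicate: [base]*lo ++ [spike]*(hi-lo) ++ [base]*(steps-hi),
--     # with the segment boundaries clamped into [0, steps] up front.
--     lo = max(0, min(spike_start, steps))
--     hi = max(lo, min(spike_end, steps))
--     return [base] * lo + [spike] * (hi - lo) + [base] * (steps - hi)
-- ===== Notes on version B (the rewrite author's own statement) =====
-- stated objective: alternative
-- what changed: B computes the clamped segment boundaries lo/hi arithmetically and returns the concatenation of three independent replicates [base]*lo + [spike]*(hi-lo) + [base]*(steps-hi), instead of A's per-step loop that branches on the spike condition at every t.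
import Mathlib
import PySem

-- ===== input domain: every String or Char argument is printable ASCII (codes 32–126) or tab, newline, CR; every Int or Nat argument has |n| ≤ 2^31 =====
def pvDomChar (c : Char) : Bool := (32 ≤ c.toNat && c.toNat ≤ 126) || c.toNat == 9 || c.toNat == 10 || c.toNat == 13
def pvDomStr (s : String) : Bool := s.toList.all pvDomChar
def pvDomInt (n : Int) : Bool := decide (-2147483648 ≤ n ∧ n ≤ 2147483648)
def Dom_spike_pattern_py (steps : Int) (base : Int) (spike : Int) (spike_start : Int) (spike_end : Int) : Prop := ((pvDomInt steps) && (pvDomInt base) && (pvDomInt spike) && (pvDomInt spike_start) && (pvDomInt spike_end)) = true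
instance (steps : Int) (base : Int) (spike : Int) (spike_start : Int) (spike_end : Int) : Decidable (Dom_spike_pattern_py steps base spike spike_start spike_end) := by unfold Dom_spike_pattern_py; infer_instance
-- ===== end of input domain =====

-- B replaces A's per-step branching loop by clamped-boundary arithmetic plus the concatenation of three replicated segments (same O(steps) cost, different decomposition).

-- ===== PORT A =====
-- literal port: append spike or base for each t in range(steps)
def spike_pattern_py (steps : Int) (base : Int) (spike : Int) (spike_start : Int) (spike_end : Int) : List Int :=
  (PySem.List.pyRange 0 steps 1).foldl
    (fun pattern t => if spike_start ≤ t ∧ t < spike_end then pattern ++ [spike] else pattern ++ [base])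
    []

-- ===== PORT B =====
-- literal port of Source B: compute lo/hi, concatenate three replicates
def spike_pattern_py_alt (steps : Int) (base : Int) (spike : Int) (spike_start : Int) (spike_end : Int) : List Int :=
  let lo := max 0 (min spike_start steps)
  let hi := max lo (min spike_end steps)
  List.replicate lo.toNat base ++ List.replicate (hi - lo).toNat spike ++ List.replicate (steps - hi).toNat base

-- ===== PRECONDITION & SPEC =====
def Spec_spike_pattern_py (steps : Int) (base : Int) (spike : Int) (spike_start : Int) (spike_end : Int) (out : List Int) : Prop := out = spike_pattern_py_alt steps base spike spike_start spike_end
instance (steps : Int) (base : Int) (spike : Int) (spike_start : Int) (spike_end : Int) (out : List Int) : Decidable (Spec_spike_pattern_py steps base spike spike_start spike_end out) := by unfold Spec_spike_pattern_py; infer_instance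

-- ===== CLAIM (what is proved, stated in full; the proofs are below) =====
def Claim_equal_spike_pattern_py : Prop := ∀ (steps : Int) (base : Int) (spike : Int) (spike_start : Int) (spike_end : Int), Dom_spike_pattern_py steps base spike spike_start spike_end → Spec_spike_pattern_py steps base spike spike_start spike_end (spike_pattern_py steps base spike spike_start spike_end)

-- ===== LEMMAS AND PROOFS =====

-- A's loop is the map of the per-index choice over range(steps)
theorem spike_pattern_py_eq_map (steps base spike spike_start spike_end : Int) :
    spike_pattern_py steps base spike spike_start spike_end =
      (List.range steps.toNat).map
        (fun (k : Nat) => if spike_start ≤ (k : Int) ∧ (k : Int) < spike_end then spike else base) := by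
  unfold spike_pattern_py
  have hf : (fun (pattern : List Int) (t : Int) =>
      if spike_start ≤ t ∧ t < spike_end then pattern ++ [spike] else pattern ++ [base]) =
      (fun pattern t => pattern ++ [if spike_start ≤ t ∧ t < spike_end then spike else base]) := by
    funext pattern t; split <;> simp_all
  rw [hf, PySem.List.foldl_append_singleton_eq_map, PySem.List.pyRange_one, List.map_map]
  simp [Function.comp_def]

theorem spike_pattern_py_spec' (steps base spike spike_start spike_end : Int) :
    spike_pattern_py steps base spike spike_start spike_end =
      spike_pattern_py_alt steps base spike spike_start spike_end := by
  rw [spike_pattern_py_eq_map]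
  unfold spike_pattern_py_alt
  apply List.ext_getElem
  · simp; omega
  · intro i h1 h2
    simp only [List.length_map, List.length_range] at h1
    simp only [List.getElem_map, List.getElem_range, List.getElem_append,
      List.length_replicate, List.getElem_replicate, List.length_append]
    split_ifs <;> omega

-- ===== VERDICT (by name: the statement is the Claim_ definition above) =====
theorem spike_pattern_py_spec : Claim_equal_spike_pattern_py := by
  intro steps base spike spike_start spike_end _
  exact spike_pattern_py_spec' steps base spike spike_start spike_end
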